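-- pv_equiv track=rewrite | github.com/shahartr/DNA_Storage | advance_generator/advance_filtering.py | next_primer
-- ===== SOURCE A (Python) =====
-- def next_primer(strand):
--     suffix = ""
--     for i in range((len(strand) - 1), -1, -1):
--         if strand[i] == 'A':
--             suffix = 'C' + suffix
--             break
--         elif strand[i] == 'C':
--             suffix = 'G' + suffix
--             break
--         elif strand[i] == 'G':
--             suffix = 'T' + suffix
--             break
--         else:
--             suffix = 'A' + suffix
--     return strand[0:len(strand) - len(suffix)] + suffix
-- ===== SOURCE B (Python) =====
-- def next_primer(strand):
--     i = len(strand) - 1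
--     while i >= 0 and strand[i] not in 'ACG':
--         i -= 1
--     if i < 0:
--         return 'A' * len(strand)
--     nxt = {'A': 'C', 'C': 'G', 'G': 'T'}[strand[i]]
--     return strand[:i] + nxt + 'A' * (len(strand) - 1 - i)
-- ===== Notes on version B (the rewrite author's own statement) =====
-- stated objective: faster
-- what changed: B replaces A's right-to-left loop that grows the suffix by repeated string prepending ('A' + suffix, quadratic in the trailing run) with a single index scan for the rightmost A/C/G followed by one slice + one 'A'*k fill.
import Mathlib
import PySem

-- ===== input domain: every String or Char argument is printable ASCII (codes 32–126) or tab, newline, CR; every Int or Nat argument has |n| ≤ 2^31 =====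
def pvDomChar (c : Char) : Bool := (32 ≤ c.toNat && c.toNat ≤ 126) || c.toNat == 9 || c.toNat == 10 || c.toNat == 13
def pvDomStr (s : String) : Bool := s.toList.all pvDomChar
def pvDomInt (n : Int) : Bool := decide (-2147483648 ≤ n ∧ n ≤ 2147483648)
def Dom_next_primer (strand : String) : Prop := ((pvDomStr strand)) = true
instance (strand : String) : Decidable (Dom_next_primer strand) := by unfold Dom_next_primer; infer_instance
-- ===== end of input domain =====

-- ===== PORT A =====
-- A: scan i from len-1 down to 0; on A/C/G prepend its successor and break,
-- otherwise prepend 'A' and continue; result = strand[0:len-len(suffix)] + suffix.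
-- The for over range(len-1,-1,-1) is transliterated as structural recursion on i
-- counting down; strand[i] is always in range inside the loop, so getD is exact.
def nextLoopA (s : List Char) (suffix : List Char) : Nat → List Char
  | 0 => suffix
  | i + 1 =>
    let c := s.getD i ' '
    if c = 'A' then 'C' :: suffix
    else if c = 'C' then 'G' :: suffix
    else if c = 'G' then 'T' :: suffix
    else nextLoopA s ('A' :: suffix) i

def next_primer (strand : String) : String :=
  String.ofList (PySem.List.slice strand.toList (some 0)
      (some ((strand.toList.length : Int) - ((nextLoopA strand.toList [] strand.toList.length).length : Int)))
    ++ nextLoopA strand.toList [] strand.toList.length)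

-- ===== PORT B =====
-- B: find the rightmost index holding 'A'/'C'/'G' (the while loop, as recursion
-- counting i down), then one slice + successor char + 'A'-fill.
def isACG (c : Char) : Bool := c = 'A' || c = 'C' || c = 'G'

def findACG (s : List Char) : Nat → Option Nat
  | 0 => none
  | i + 1 => if isACG (s.getD i ' ') then some i else findACG s i

def succBase (c : Char) : Char :=
  if c = 'A' then 'C' else if c = 'C' then 'G' else 'T'

def next_primer_alt (strand : String) : String :=
  match findACG strand.toList strand.toList.length with
  | none => String.ofList (List.replicate strand.toList.length 'A')
  | some i => String.ofList (strand.toList.take i ++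
      succBase (strand.toList.getD i ' ') :: List.replicate (strand.toList.length - 1 - i) 'A')

-- ===== PRECONDITION & SPEC =====
def Spec_next_primer (strand : String) (out : String) : Prop := out = next_primer_alt strand
instance (strand : String) (out : String) : Decidable (Spec_next_primer strand out) := by unfold Spec_next_primer; infer_instance

-- ===== CLAIM (what is proved, stated in full; the proofs are below) =====
def Claim_equal_next_primer : Prop := ∀ (strand : String), Dom_next_primer strand → Spec_next_primer strand (next_primer strand)

-- ===== LEMMAS AND PROOFS =====

theorem findACG_lt (s : List Char) : ∀ n i, findACG s n = some i → i < n := by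
  intro n
  induction n with
  | zero => intro i h; simp [findACG] at h
  | succ m ih =>
    intro i h
    simp only [findACG] at h
    split at h
    · simp at h; omega
    · have := ih i h; omega

theorem nextLoopA_char (s : List Char) : ∀ n suffix,
    nextLoopA s suffix n =
      (match findACG s n with
        | none => List.replicate n 'A' ++ suffix
        | some i => succBase (s.getD i ' ') :: List.replicate (n - 1 - i) 'A' ++ suffix) := by
  intro n
  induction n with
  | zero => intro suffix; simp [nextLoopA, findACG]
  | succ m ih =>
    intro suffix
    by_cases hA : s.getD m ' ' = 'A'
    · simp only [List.getD] at hA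
      simp [nextLoopA, findACG, isACG, succBase, List.getD, hA]
    · by_cases hC : s.getD m ' ' = 'C'
      · simp only [List.getD] at hA hC
        simp [nextLoopA, findACG, isACG, succBase, List.getD, hC]
      · by_cases hG : s.getD m ' ' = 'G'
        · simp only [List.getD] at hA hC hG
          simp [nextLoopA, findACG, isACG, succBase, List.getD, hG]
        · simp only [List.getD] at hA hC hG
          have hloop : nextLoopA s suffix (m + 1) = nextLoopA s ('A' :: suffix) m := by
            simp [nextLoopA, List.getD, hA, hC, hG]
          have hfind : findACG s (m + 1) = findACG s m := by
            simp [findACG, isACG, List.getD, hA, hC, hG]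
          rw [hloop, ih, hfind]
          cases hf : findACG s m with
          | none =>
            simp only []
            rw [List.replicate_succ']
            simp
          | some i =>
            have hi := findACG_lt s m i hf
            simp only []
            have h1 : m + 1 - 1 - i = (m - 1 - i) + 1 := by omega
            rw [h1, List.replicate_succ']
            simp

theorem next_primer_spec_aux (strand : String) :
    next_primer strand = next_primer_alt strand := by
  unfold next_primer next_primer_alt
  rw [nextLoopA_char]
  cases hf : findACG strand.toList strand.toList.length with
  | none =>
    simp only [List.append_nil]
    have h1 : ((strand.toList.length : Int) - ((List.replicate strand.toList.length 'A').length : Int))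
        = ((0 : Nat) : Int) := by simp
    rw [h1]
    simp [PySem.List.slice_to]
  | some i =>
    have hi := findACG_lt strand.toList strand.toList.length i hf
    simp only [List.append_nil]
    have hlen : (((succBase (strand.toList.getD i ' ') :: List.replicate (strand.toList.length - 1 - i) 'A').length : Int))
        = ((strand.toList.length - i : Nat) : Int) := by
      simp only [List.length_cons, List.length_replicate]; push_cast; omega
    rw [hlen]
    have h2 : ((strand.toList.length : Int) - ((strand.toList.length - i : Nat) : Int)) = ((i : Nat) : Int) := by
      omega
    rw [h2]
    simp [PySem.List.slice_to_natCast]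

-- ===== VERDICT (by name: the statement is the Claim_ definition above) =====
theorem next_primer_spec : Claim_equal_next_primer := by
  intro strand _
  unfold Spec_next_primer
  exact next_primer_spec_aux strand
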